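-- pv_equiv track=rewrite | github.com/hw725/CSP | .history/sa/tokenizer_20250620161214.py | basic_text_split
-- ===== SOURCE A (Python) =====
-- from typing import List, Optional, Callable
--
-- def basic_text_split(text: str, min_tokens: int = 1, max_tokens: int = 10) -> List[str]:
--     """기본 텍스트 분할 (백업용)"""
--
--     # 구두점 기준 분할
--     delimiters = ['.', '!', '?', '。', '！', '？', ',', '，', ';', '：', ':']
--
--     units = [text]
--
--     for delimiter in delimiters:
--         new_units = []
--         for unit in units:
--             if delimiter in unit:
--                 parts = unit.split(delimiter)
--                 for i, part in enumerate(parts):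
--                     if i < len(parts) - 1:  # 마지막이 아니면 구분자 포함
--                         new_units.append(part + delimiter)
--                     else:
--                         if part.strip():  # 마지막 부분이 비어있지 않으면
--                             new_units.append(part)
--             else:
--                 new_units.append(unit)
--         units = [u.strip() for u in new_units if u.strip()]
--
--     return apply_length_constraints(units, min_tokens, max_tokens, is_src=False)
--
-- def apply_length_constraints(
--     units: List[str],
--     min_tokens: int,
--     max_tokens: int,
--     is_src: bool = True
-- ) -> List[str]:
--     """길이 제한 적용"""
--
--     if min_tokens <= 1 and max_tokens >= 50:
--         return units  # 제한이 느슨하면 그대로 반환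
--
--     constrained_units = []
--
--     for unit in units:
--         unit_len = len(unit)
--
--         if unit_len > max_tokens * 3:  # 대략적인 글자 수 기준
--             # 너무 긴 단위는 분할
--             mid = len(unit) // 2
--             # 적절한 분할점 찾기
--             for i in range(mid - 5, mid + 5):
--                 if i > 0 and i < len(unit) and unit[i] in ' ，,、':
--                     constrained_units.append(unit[:i+1].strip())
--                     constrained_units.append(unit[i+1:].strip())
--                     break
--             else:
--                 # 적절한 분할점 없으면 중간에서 분할
--                 constrained_units.append(unit[:mid].strip())
--                 constrained_units.append(unit[mid:].strip())
--         else: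
--             constrained_units.append(unit)
--
--     # 너무 짧은 단위는 합치기
--     if min_tokens > 1:
--         merged_units = []
--         temp_unit = ""
--
--         for unit in constrained_units:
--             if len(temp_unit + unit) < min_tokens * 2:  # 대략적인 기준
--                 temp_unit += unit
--             else:
--                 if temp_unit:
--                     merged_units.append(temp_unit.strip())
--                 temp_unit = unit
--
--         if temp_unit:
--             merged_units.append(temp_unit.strip())
--
--         constrained_units = merged_units
--
--     return [u for u in constrained_units if u.strip()]
-- ===== SOURCE B (Python) =====
-- from typing import List
--
-- def basic_text_split(text: str, min_tokens: int = 1, max_tokens: int = 10) -> List[str]: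
--     """Single-pass character scan instead of eleven per-delimiter split passes;
--     length constraints decomposed into small helper functions."""
--     delims = set('.!?。！？,，;：:')
--     tokens = []
--     buf = ""
--     for ch in text:
--         buf += ch
--         if ch in delims:
--             tokens.append(buf)
--             buf = ""
--     if buf:
--         tokens.append(buf)
--     units = strip_nonblank(tokens)
--     return constrain(units, min_tokens, max_tokens)
--
-- def strip_nonblank(tokens):
--     units = []
--     for t in tokens:
--         s = t.strip()
--         if s:
--             units.append(s)
--     return units
--
-- def split_long(u, max_tokens):
--     if len(u) <= max_tokens * 3:
--         return [u]
--     mid = len(u) // 2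
--     cut = next((i for i in range(mid - 5, mid + 5)
--                 if 0 < i < len(u) and u[i] in ' ，,、'), mid - 1)
--     return [u[:cut + 1].strip(), u[cut + 1:].strip()]
--
-- def merge_step(p, u, min_tokens):
--     out, acc = p
--     if len(acc) + len(u) < min_tokens * 2:
--         return (out, acc + u)
--     return ((out + [acc.strip()] if acc else out), u)
--
-- def merge_short(pieces, min_tokens):
--     p = ([], "")
--     for u in pieces:
--         p = merge_step(p, u, min_tokens)
--     out, acc = p
--     return out + [acc.strip()] if acc else out
--
-- def keep_nonblank(pieces):
--     kept = []
--     for u in pieces: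
--         if u.strip():
--             kept.append(u)
--     return kept
--
-- def constrain(units, min_tokens, max_tokens):
--     if min_tokens <= 1 and max_tokens >= 50:
--         return units
--     pieces = []
--     for u in units:
--         pieces.extend(split_long(u, max_tokens))
--     if min_tokens > 1:
--         pieces = merge_short(pieces, min_tokens)
--     return keep_nonblank(pieces)
-- ===== Notes on version B (the rewrite author's own statement) =====
-- stated objective: alternative
-- what changed: A splits the text once per delimiter (11 split+strip passes rebuilding the unit list each time) and applies length constraints in one monolithic loop; B tokenizes in a single left-to-right character scan that emits the buffer at each delimiter, then strip-filters recursively, and decomposes the length constraints into small recursive helpers (split_long / merge_short with an accumulator / keep_nonblank).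
import Mathlib
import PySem

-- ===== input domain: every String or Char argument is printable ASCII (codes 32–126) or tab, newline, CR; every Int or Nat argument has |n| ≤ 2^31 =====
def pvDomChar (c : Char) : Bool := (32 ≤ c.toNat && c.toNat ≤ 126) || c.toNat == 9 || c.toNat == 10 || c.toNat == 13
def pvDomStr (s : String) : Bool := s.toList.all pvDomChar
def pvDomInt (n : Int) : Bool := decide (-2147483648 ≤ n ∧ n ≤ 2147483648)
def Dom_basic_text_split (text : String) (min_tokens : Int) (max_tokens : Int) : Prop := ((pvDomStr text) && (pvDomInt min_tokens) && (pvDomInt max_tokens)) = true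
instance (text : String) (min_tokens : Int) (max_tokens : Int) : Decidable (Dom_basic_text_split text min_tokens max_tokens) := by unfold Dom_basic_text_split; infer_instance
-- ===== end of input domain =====

-- B replaces A's eleven split-strip passes (one per delimiter) by ONE character scan emitting a
-- delimiter-terminated buffer at each delimiter, and replaces A's monolithic length-constraint
-- loop by small recursive helpers (split_long / merge_short / keep_nonblank).

-- ===== PORT A =====

-- A: the comprehension  [u.strip() for u in xs if u.strip()]
def stripFilter (xs : List (List Char)) : List (List Char) :=
  (xs.filter (fun u => PySem.Chars.strip u ≠ [])).map PySem.Chars.strip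

-- A: apply_length_constraints — inner for-else split-point search
def alcFindSplit (u : List Char) : List Int → Option Int
  | [] => none
  | i :: is =>
    if 0 < i ∧ i < PySem.List.len u ∧ (PySem.List.pyGetD u i ' ') ∈ ([' ', '，', ',', '、'] : List Char)
    then some i else alcFindSplit u is

-- A: apply_length_constraints(units, min_tokens, max_tokens, is_src) over List Char units
def applyLengthConstraints (units : List (List Char)) (min_tokens max_tokens : Int) (_is_src : Bool) : List (List Char) :=
  if min_tokens ≤ 1 ∧ 50 ≤ max_tokens then units
  else
    let constrained := units.foldl (fun acc unit =>
      if max_tokens * 3 < PySem.List.len unit then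
        let mid := PySem.Int.floordiv (PySem.List.len unit) 2
        match alcFindSplit unit (PySem.List.pyRange (mid - 5) (mid + 5) 1) with
        | some i => acc ++ [PySem.Chars.strip (PySem.Chars.slice unit none (some (i + 1))),
                            PySem.Chars.strip (PySem.Chars.slice unit (some (i + 1)) none)]
        | none   => acc ++ [PySem.Chars.strip (PySem.Chars.slice unit none (some mid)),
                            PySem.Chars.strip (PySem.Chars.slice unit (some mid) none)]
      else acc ++ [unit]) []
    let constrained2 :=
      if 1 < min_tokens then
        let mt := constrained.foldl (fun (p : List (List Char) × List Char) unit =>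
          if PySem.List.len (p.2 ++ unit) < min_tokens * 2 then (p.1, p.2 ++ unit)
          else ((if p.2 ≠ [] then p.1 ++ [PySem.Chars.strip p.2] else p.1), unit)) ([], [])
        if mt.2 ≠ [] then mt.1 ++ [PySem.Chars.strip mt.2] else mt.1
      else constrained
    constrained2.filter (fun u => PySem.Chars.strip u ≠ [])

-- A: the enumerate loop over parts — part+delimiter for every non-last part, last part kept iff part.strip()
def aAttach (d : Char) : List (List Char) → List (List Char)
  | [] => []
  | [p] => if PySem.Chars.strip p ≠ [] then [p] else []
  | p :: q :: ps => (p ++ [d]) :: aAttach d (q :: ps)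

-- A: body of "for unit in units" for one delimiter
def aPassUnit (d : Char) (u : List Char) : List (List Char) :=
  if PySem.Chars.isIn [d] u then aAttach d (PySem.Chars.splitOn u [d]) else [u]

-- A: one pass of "for delimiter in delimiters" (build new_units, then strip-filter)
def aPass (units : List (List Char)) (d : Char) : List (List Char) :=
  stripFilter (units.flatMap (aPassUnit d))

def pvDelims : List Char := ['.', '!', '?', '。', '！', '？', ',', '，', ';', '：', ':']

def basic_text_split (text : String) (min_tokens : Int) (max_tokens : Int) : List String :=
  let units := pvDelims.foldl aPass [text.toList]
  (applyLengthConstraints units min_tokens max_tokens false).map String.ofList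

-- ===== PORT B =====

-- B: single left-to-right scan, emitting the buffer (delimiter attached) at each delimiter
def bScan (ds : List Char) : List Char → List Char → List (List Char)
  | [], buf => if buf ≠ [] then [buf] else []
  | c :: cs, buf => if c ∈ ds then (buf ++ [c]) :: bScan ds cs [] else bScan ds cs (buf ++ [c])

-- B: strip_nonblank — accumulator loop appending each non-blank stripped token
def bUnits (tokens : List (List Char)) : List (List Char) :=
  tokens.foldl (fun acc t =>
    if PySem.Chars.strip t ≠ [] then acc ++ [PySem.Chars.strip t] else acc) []

-- B: split_long — one long unit into its two halves (next(...) with default mid-1)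
def bSplitLong (u : List Char) (max_tokens : Int) : List (List Char) :=
  if PySem.List.len u ≤ max_tokens * 3 then [u]
  else
    let mid := PySem.Int.floordiv (PySem.List.len u) 2
    let cut := ((PySem.List.pyRange (mid - 5) (mid + 5) 1).find?
        (fun i => decide (0 < i ∧ i < PySem.List.len u ∧
          (PySem.List.pyGetD u i ' ') ∈ ([' ', '，', ',', '、'] : List Char)))).getD (mid - 1)
    [PySem.Chars.strip (PySem.Chars.slice u none (some (cut + 1))),
     PySem.Chars.strip (PySem.Chars.slice u (some (cut + 1)) none)]

-- B: merge_step — one step of merge_short, as its own function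
def bMergeStep (min_tokens : Int) (p : List (List Char) × List Char) (u : List Char) :
    List (List Char) × List Char :=
  if PySem.List.len p.2 + PySem.List.len u < min_tokens * 2 then (p.1, p.2 ++ u)
  else ((if p.2 ≠ [] then p.1 ++ [PySem.Chars.strip p.2] else p.1), u)

-- B: merge_short — loop over merge_step, then flush the accumulator
def bMerge (min_tokens : Int) (pieces : List (List Char)) : List (List Char) :=
  let p := pieces.foldl (bMergeStep min_tokens) ([], [])
  if p.2 ≠ [] then p.1 ++ [PySem.Chars.strip p.2] else p.1

-- B: keep_nonblank — accumulator loop keeping the non-blank pieces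
def bKeep (pieces : List (List Char)) : List (List Char) :=
  pieces.foldl (fun acc u => if PySem.Chars.strip u ≠ [] then acc ++ [u] else acc) []

-- B: constrain
def bConstrain (units : List (List Char)) (min_tokens max_tokens : Int) : List (List Char) :=
  if min_tokens ≤ 1 ∧ 50 ≤ max_tokens then units
  else
    let pieces := units.flatMap (fun u => bSplitLong u max_tokens)
    let pieces2 := if 1 < min_tokens then bMerge min_tokens pieces else pieces
    bKeep pieces2

def basic_text_split_alt (text : String) (min_tokens : Int) (max_tokens : Int) : List String :=
  let tokens := bScan pvDelims text.toList []
  let units := bUnits tokens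
  (bConstrain units min_tokens max_tokens).map String.ofList

-- ===== PRECONDITION & SPEC =====
def Spec_basic_text_split (text : String) (min_tokens : Int) (max_tokens : Int) (out : List String) : Prop := out = basic_text_split_alt text min_tokens max_tokens
instance (text : String) (min_tokens : Int) (max_tokens : Int) (out : List String) : Decidable (Spec_basic_text_split text min_tokens max_tokens out) := by unfold Spec_basic_text_split; infer_instance

-- ===== CLAIM (what is proved, stated in full; the proofs are below) =====
def Claim_equal_basic_text_split : Prop := ∀ (text : String) (min_tokens : Int) (max_tokens : Int), Dom_basic_text_split text min_tokens max_tokens → Spec_basic_text_split text min_tokens max_tokens (basic_text_split text min_tokens max_tokens)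

-- ===== LEMMAS AND PROOFS =====

def allWS (w : List Char) : Prop := ∀ c ∈ w, PySem.Chars.isspace c = true
def dsFree (ds x : List Char) : Prop := ∀ c ∈ x, c ∉ ds

-- ---- strip facts ----
theorem strip_nil : PySem.Chars.strip [] = [] := rfl

theorem rstrip_eq_nil_iff (w : List Char) : PySem.Chars.rstrip w = [] ↔ allWS w := by
  rw [PySem.Chars.rstrip, List.reverse_eq_nil_iff, List.dropWhile_eq_nil_iff]
  constructor
  · intro h c hc; exact h c (List.mem_reverse.2 hc)
  · intro h c hc; exact h c (List.mem_reverse.1 hc)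

theorem strip_eq_nil_iff (w : List Char) : PySem.Chars.strip w = [] ↔ allWS w := by
  rw [PySem.Chars.strip, rstrip_eq_nil_iff]
  constructor
  · intro h c hc
    rcases List.mem_append.1 (by rw [List.takeWhile_append_dropWhile]; exact hc :
        c ∈ List.takeWhile PySem.Chars.isspace w ++ List.dropWhile PySem.Chars.isspace w) with h1 | h1
    · exact List.mem_takeWhile_imp h1
    · exact h c h1
  · intro h c hc
    exact h c (List.dropWhile_sublist _ |>.mem hc)

theorem lstrip_append_ws {w b : List Char} (h : allWS w) :
    PySem.Chars.lstrip (w ++ b) = PySem.Chars.lstrip b := by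
  have hw : List.dropWhile PySem.Chars.isspace w = [] := List.dropWhile_eq_nil_iff.2 h
  simp [PySem.Chars.lstrip, List.dropWhile_append, hw]

theorem strip_append_ws_left {w b : List Char} (h : allWS w) :
    PySem.Chars.strip (w ++ b) = PySem.Chars.strip b := by
  rw [PySem.Chars.strip, lstrip_append_ws h, PySem.Chars.strip]

theorem rstrip_append_ws {w b : List Char} (h : allWS w) :
    PySem.Chars.rstrip (b ++ w) = PySem.Chars.rstrip b := by
  have hw : List.dropWhile PySem.Chars.isspace w.reverse = [] :=
    List.dropWhile_eq_nil_iff.2 (fun c hc => h c (by simpa using hc))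
  simp [PySem.Chars.rstrip, List.dropWhile_append, hw]

theorem strip_append_ws_right {w b : List Char} (h : allWS w) :
    PySem.Chars.strip (b ++ w) = PySem.Chars.strip b := by
  rw [PySem.Chars.strip, PySem.Chars.lstrip, List.dropWhile_append]
  by_cases hb : (List.dropWhile PySem.Chars.isspace b).isEmpty
  · have hw : List.dropWhile PySem.Chars.isspace w = [] := List.dropWhile_eq_nil_iff.2 h
    rw [if_pos hb, hw]
    simp only [List.isEmpty_iff] at hb
    rw [PySem.Chars.strip, PySem.Chars.lstrip, hb]
  · rw [if_neg hb, rstrip_append_ws h, PySem.Chars.strip, PySem.Chars.lstrip]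

theorem lstrip_of_head_not_ws {x : List Char} (h : ∀ c, x.head? = some c → PySem.Chars.isspace c = false) :
    PySem.Chars.lstrip x = x := by
  cases x with
  | nil => rfl
  | cons c cs => simp [PySem.Chars.lstrip, h c rfl]

theorem head_lstrip_not_ws (u : List Char) (c : Char) (h : (PySem.Chars.lstrip u).head? = some c) :
    PySem.Chars.isspace c = false := by
  induction u with
  | nil => simp [PySem.Chars.lstrip] at h
  | cons a as ih =>
    rw [PySem.Chars.lstrip, List.dropWhile_cons] at h
    split at h
    · exact ih (by rwa [PySem.Chars.lstrip])
    · simp at h; subst h; simp_all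

theorem rstrip_prefix (x : List Char) : PySem.Chars.rstrip x <+: x := by
  rw [PySem.Chars.rstrip]
  have : (List.dropWhile PySem.Chars.isspace x.reverse) <:+ x.reverse := List.dropWhile_suffix _
  have := List.reverse_prefix.2 (by simpa using this)
  simpa using this

theorem strip_idem (u : List Char) : PySem.Chars.strip (PySem.Chars.strip u) = PySem.Chars.strip u := by
  rw [show PySem.Chars.strip (PySem.Chars.strip u) =
      PySem.Chars.rstrip (PySem.Chars.lstrip (PySem.Chars.strip u)) from rfl]
  have h1 : PySem.Chars.lstrip (PySem.Chars.strip u) = PySem.Chars.strip u := by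
    apply lstrip_of_head_not_ws
    intro c hc
    have hpre := rstrip_prefix (PySem.Chars.lstrip u)
    have : (PySem.Chars.lstrip u).head? = some c := by
      rw [PySem.Chars.strip] at hc
      rcases hpre with ⟨t, ht⟩
      rw [← ht]
      cases hh : (PySem.Chars.rstrip (PySem.Chars.lstrip u)) with
      | nil => rw [hh] at hc; simp at hc
      | cons a b => rw [hh] at hc; simp at hc; simp [hc]
    exact head_lstrip_not_ws u c this
  rw [h1, PySem.Chars.strip]
  simp [PySem.Chars.rstrip, List.dropWhile_idempotent]

theorem strip_decomp (u : List Char) :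
    ∃ w1 w2, allWS w1 ∧ allWS w2 ∧ u = w1 ++ PySem.Chars.strip u ++ w2 := by
  refine ⟨List.takeWhile PySem.Chars.isspace u,
          (List.takeWhile PySem.Chars.isspace (PySem.Chars.lstrip u).reverse).reverse,
          fun c hc => List.mem_takeWhile_imp hc,
          fun c hc => List.mem_takeWhile_imp (by simpa using hc), ?_⟩
  conv_lhs => rw [← List.takeWhile_append_dropWhile (p := PySem.Chars.isspace) (l := u)]
  rw [List.append_assoc]
  congr 1
  rw [PySem.Chars.strip]
  conv_lhs => rw [show List.dropWhile PySem.Chars.isspace u = PySem.Chars.lstrip u from rfl]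
  conv_lhs => rw [← List.reverse_reverse (PySem.Chars.lstrip u),
    ← List.takeWhile_append_dropWhile (p := PySem.Chars.isspace) (l := (PySem.Chars.lstrip u).reverse)]
  rw [List.reverse_append, PySem.Chars.rstrip]

-- ---- stripFilter facts ----
theorem stripFilter_append (a b : List (List Char)) :
    stripFilter (a ++ b) = stripFilter a ++ stripFilter b := by
  simp [stripFilter, List.filter_append]

theorem stripFilter_single (u : List Char) :
    stripFilter [u] = if PySem.Chars.strip u ≠ [] then [PySem.Chars.strip u] else [] := by
  simp only [stripFilter, List.filter]
  split_ifs with h1 <;> simp_all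

theorem stripFilter_cons (u : List Char) (xs : List (List Char)) :
    stripFilter (u :: xs) =
      (if PySem.Chars.strip u ≠ [] then [PySem.Chars.strip u] else []) ++ stripFilter xs := by
  rw [show u :: xs = [u] ++ xs from rfl, stripFilter_append, stripFilter_single]

theorem stripFilter_flatMap (l : List (List Char)) (f : List Char → List (List Char)) :
    stripFilter (l.flatMap f) = l.flatMap (fun u => stripFilter (f u)) := by
  induction l with
  | nil => rfl
  | cons x xs ih => simp only [List.flatMap_cons, stripFilter_append, ih]

theorem stripFilter_eq_flatMap (l : List (List Char)) :
    stripFilter l = l.flatMap (fun u => stripFilter [u]) := by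
  induction l with
  | nil => rfl
  | cons x xs ih => rw [stripFilter_cons, List.flatMap_cons, ih, stripFilter_single]

def goodUnits (units : List (List Char)) : Prop :=
  ∀ u ∈ units, PySem.Chars.strip u = u ∧ u ≠ []

theorem goodUnits_stripFilter (xs : List (List Char)) : goodUnits (stripFilter xs) := by
  intro u hu
  simp only [stripFilter, List.mem_map, List.mem_filter] at hu
  obtain ⟨v, ⟨_, hv⟩, rfl⟩ := hu
  exact ⟨strip_idem v, by simpa using hv⟩

theorem stripFilter_of_good {units : List (List Char)} (h : goodUnits units) :
    stripFilter units = units := by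
  induction units with
  | nil => rfl
  | cons x xs ih =>
    obtain ⟨hs, hn⟩ := h x (by simp)
    rw [stripFilter_cons, if_pos (by rw [hs]; exact hn), hs,
        ih (fun u hu => h u (by simp [hu]))]
    rfl

-- ---- scan facts ----
theorem bScan_free {ds x : List Char} (h : dsFree ds x) (buf : List Char) :
    bScan ds x buf = if buf ++ x ≠ [] then [buf ++ x] else [] := by
  induction x generalizing buf with
  | nil => simp [bScan]
  | cons c cs ih =>
    rw [bScan, if_neg (h c (by simp))]
    rw [ih (fun a ha => h a (by simp [ha]))]
    simp

theorem bScan_append_free {ds x : List Char} (h : dsFree ds x) (t buf : List Char) :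
    bScan ds (x ++ t) buf = bScan ds t (buf ++ x) := by
  induction x generalizing buf with
  | nil => simp
  | cons c cs ih =>
    rw [List.cons_append, bScan, if_neg (h c (by simp)),
        ih (fun a ha => h a (by simp [ha]))]
    simp

theorem bScan_not_mem {d : Char} {u : List Char} (h : d ∉ u) (ds : List Char) (buf : List Char) :
    bScan (d :: ds) u buf = bScan ds u buf := by
  induction u generalizing buf with
  | nil => rfl
  | cons c cs ih =>
    have hc : c ≠ d := fun he => h (by simp [he])
    have hcs : d ∉ cs := fun hm => h (by simp [hm])
    rw [bScan, bScan]
    by_cases hm : c ∈ ds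
    · rw [if_pos (by simp [hm]), if_pos hm, ih hcs]
    · rw [if_neg (by simp [hc, hm]), if_neg hm, ih hcs]

theorem stripFilter_bScan_ws_buf {ds : List Char}
    {w : List Char} (hw : allWS w) (t b : List Char) :
    stripFilter (bScan ds t (w ++ b)) = stripFilter (bScan ds t b) := by
  induction t generalizing b with
  | nil =>
    by_cases hb : b = []
    · subst hb
      by_cases hwn : w = []
      · simp [hwn]
      · rw [bScan, bScan, List.append_nil, if_pos hwn, if_neg (by simp),
            stripFilter_single, if_neg (by simp [strip_eq_nil_iff, hw])]
        rfl
    · have h1 : w ++ b ≠ [] := by simp [hb]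
      simp only [bScan, if_pos h1, if_pos hb]
      rw [stripFilter_single, stripFilter_single, strip_append_ws_left hw]
  | cons c cs ih =>
    rw [bScan, bScan]
    by_cases hc : c ∈ ds
    · rw [if_pos hc, if_pos hc, stripFilter_cons, stripFilter_cons,
          List.append_assoc, strip_append_ws_left hw]
    · rw [if_neg hc, if_neg hc, List.append_assoc]
      exact ih (b ++ [c])

theorem stripFilter_bScan_ws_suffix {ds : List Char} (hds : ∀ c ∈ ds, PySem.Chars.isspace c = false)
    {w : List Char} (hw : allWS w) (t buf : List Char) :
    stripFilter (bScan ds (t ++ w) buf) = stripFilter (bScan ds t buf) := by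
  have hfree : dsFree ds w := fun c hc hm => by
    have h1 := hds c hm; have h2 := hw c hc; rw [h2] at h1; exact absurd h1 (by simp)
  induction t generalizing buf with
  | nil =>
    rw [List.nil_append, bScan_free hfree, bScan]
    by_cases hb : buf = []
    · subst hb
      by_cases hwn : w = []
      · simp [hwn]
      · rw [List.nil_append, if_pos hwn, if_neg (by simp), stripFilter_single,
            if_neg (by simp [strip_eq_nil_iff, hw])]
        rfl
    · have h1 : buf ++ w ≠ [] := by simp [hb]
      rw [if_pos h1, if_pos hb, stripFilter_single, stripFilter_single,
          strip_append_ws_right hw]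
  | cons c cs ih =>
    rw [List.cons_append, bScan, bScan]
    split_ifs with hc
    · rw [stripFilter_cons, stripFilter_cons, ih]
    · exact ih (buf ++ [c])

theorem stripFilter_bScan_strip {ds : List Char} (hds : ∀ c ∈ ds, PySem.Chars.isspace c = false)
    (u : List Char) :
    stripFilter (bScan ds (PySem.Chars.strip u) []) = stripFilter (bScan ds u []) := by
  obtain ⟨w1, w2, h1, h2, hu⟩ := strip_decomp u
  have hfree1 : dsFree ds w1 := fun c hc hm => by
    have ha := hds c hm; have hb := h1 c hc; rw [hb] at ha; exact absurd ha (by simp)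
  conv_rhs => rw [hu]
  rw [List.append_assoc, bScan_append_free hfree1, List.nil_append]
  conv_rhs => rw [show w1 = w1 ++ ([] : List Char) from (List.append_nil w1).symm]
  rw [stripFilter_bScan_ws_buf h1, stripFilter_bScan_ws_suffix hds h2]

theorem stripFilter_bScan_blank {ds : List Char} (hds : ∀ c ∈ ds, PySem.Chars.isspace c = false)
    {u : List Char} (h : PySem.Chars.strip u = []) :
    stripFilter (bScan ds u []) = [] := by
  have hw : allWS u := (strip_eq_nil_iff u).1 h
  have hfree : dsFree ds u := fun c hc hm => by
    have ha := hds c hm; have hb := hw c hc; rw [hb] at ha; exact absurd ha (by simp)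
  rw [bScan_free hfree]
  by_cases hn : u = []
  · simp [hn, stripFilter]
  · rw [List.nil_append, if_pos hn, stripFilter_single, if_neg (by simp [h])]

-- ---- splitOn vs a direct recursive splitter ----
def parts (d : Char) : List Char → List Char → List (List Char)
  | [], cur => [cur.reverse]
  | c :: rest, cur => if c = d then cur.reverse :: parts d rest [] else parts d rest (c :: cur)

theorem splitOn_go_eq (d : Char) :
    ∀ (fuel : Nat) (l cur : List Char) (acc : List (List Char)), l.length < fuel →
    PySem.Chars.splitOn.go [d] fuel l cur acc = acc.reverse ++ parts d l cur := by
  intro fuel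
  induction fuel with
  | zero => intro l cur acc h; omega
  | succ n ih =>
    intro l cur acc h
    cases l with
    | nil =>
      rw [PySem.Chars.splitOn.go]
      all_goals simp [parts]
    | cons c rest =>
      by_cases hc : c = d
      · subst hc
        rw [PySem.Chars.splitOn.go]
        simp only [List.isPrefixOf, Bool.and_true, beq_self_eq_true,
          if_pos]
        rw [show List.drop [c].length (c :: rest) = rest from rfl,
            ih rest [] (cur.reverse :: acc) (by simp at h; omega)]
        simp [parts]
      · rw [PySem.Chars.splitOn.go]
        have hp : List.isPrefixOf [d] (c :: rest) = false := by
          simp [List.isPrefixOf]; exact fun he => absurd he.symm hc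
        simp only [hp, Bool.false_eq_true, if_false]
        rw [ih rest (c :: cur) acc (by simp at h; omega), parts, if_neg hc]

theorem splitOn_eq_parts (u : List Char) (d : Char) :
    PySem.Chars.splitOn u [d] = parts d u [] := by
  have := splitOn_go_eq d (u.length + 1) u [] [] (by omega)
  simpa [PySem.Chars.splitOn] using this

theorem parts_ne_nil (d : Char) (l cur : List Char) : parts d l cur ≠ [] := by
  induction l generalizing cur with
  | nil => simp [parts]
  | cons c cs ih => rw [parts]; split_ifs <;> simp [ih]

theorem attach_parts (d : Char) (l cur : List Char) :
    aAttach d (parts d l cur) = bScan [d] l cur.reverse ∨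
    ∃ w, bScan [d] l cur.reverse = aAttach d (parts d l cur) ++ [w] ∧
         PySem.Chars.strip w = [] ∧ w ≠ [] := by
  induction l generalizing cur with
  | nil =>
    by_cases hn : cur.reverse = []
    · left; simp [parts, aAttach, bScan, hn, strip_nil]
    · by_cases hs : PySem.Chars.strip cur.reverse = []
      · right; exact ⟨cur.reverse, by simp [parts, aAttach, bScan, hn, hs], hs, hn⟩
      · left; simp [parts, aAttach, bScan, hn, hs]
  | cons c cs ih =>
    rw [parts, bScan]
    by_cases hc : c = d
    · subst hc
      rw [if_pos rfl, if_pos (by simp)]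
      have hne := parts_ne_nil c cs []
      have hatt : aAttach c (cur.reverse :: parts c cs []) =
          (cur.reverse ++ [c]) :: aAttach c (parts c cs []) := by
        cases hp : parts c cs [] with
        | nil => exact absurd hp hne
        | cons q qs => rfl
      rw [hatt]
      rcases ih ([]) with h | ⟨w, hw, hws, hwn⟩
      · left; rw [show (([] : List Char)).reverse = ([] : List Char) from rfl] at h; rw [h]
      · right
        refine ⟨w, ?_, hws, hwn⟩
        rw [show (([] : List Char)).reverse = ([] : List Char) from rfl] at hw
        rw [hw]; rfl
    · rw [if_neg hc, if_neg (by simp [hc])]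
      have := ih (c :: cur)
      simpa using this

theorem bScan_nil_iff (ds cs buf : List Char) : bScan ds cs buf = [] ↔ cs = [] ∧ buf = [] := by
  induction cs generalizing buf with
  | nil => by_cases hb : buf = [] <;> simp [bScan, hb]
  | cons c cs ih =>
    rw [bScan]
    split_ifs with hc
    · simp
    · rw [ih]; simp

theorem bScan_single_buf (d : Char) (cs x y : List Char) :
    bScan [d] cs (x ++ y) =
      match bScan [d] cs y with
      | [] => if x ≠ [] then [x] else []
      | t :: ts => (x ++ t) :: ts := by
  induction cs generalizing y with
  | nil =>
    by_cases hy : y = []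
    · subst hy
      by_cases hx : x = [] <;> simp [bScan, hx]
    · have : x ++ y ≠ [] := by simp [hy]
      simp [bScan, hy, this]
  | cons c rest ih =>
    by_cases hc : c = d
    · subst hc
      rw [bScan, if_pos (by simp), bScan, if_pos (by simp)]
      simp
    · rw [bScan, if_neg (by simp [hc]), bScan, if_neg (by simp [hc]),
          List.append_assoc]
      exact ih (y ++ [c])

theorem bScan_compose {d : Char} {ds : List Char} (hd : d ∉ ds) :
    ∀ (u buf : List Char), dsFree ds buf →
    (bScan [d] u buf).flatMap (fun t => bScan ds t []) = bScan (d :: ds) u buf := by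
  intro u
  induction u with
  | nil =>
    intro buf hbuf
    by_cases hb : buf = []
    · simp [bScan, hb]
    · simp only [bScan, if_pos hb, List.flatMap_cons, List.flatMap_nil, List.append_nil]
      rw [bScan_free hbuf, List.nil_append, if_pos hb]
  | cons c cs ih =>
    intro buf hbuf
    rw [bScan, bScan]
    by_cases hcd : c = d
    · subst hcd
      rw [if_pos (by simp), if_pos (by simp)]
      have hfree : dsFree ds (buf ++ [c]) := by
        intro a ha; rcases List.mem_append.1 ha with h | h
        · exact hbuf a h
        · simp at h; subst h; exact hd
      rw [List.flatMap_cons, bScan_free hfree, List.nil_append, if_pos (by simp),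
          ih [] (by intro a ha; simp at ha), List.singleton_append]
    · by_cases hcds : c ∈ ds
      · rw [if_neg (by simp [hcd]), if_pos (by simp [hcds])]
        rw [show buf ++ [c] = (buf ++ [c]) ++ ([] : List Char) from (List.append_nil _).symm,
            bScan_single_buf]
        cases hsc : bScan [d] cs [] with
        | nil =>
          have hcs : cs = [] := ((bScan_nil_iff [d] cs []).1 hsc).1
          subst hcs
          rw [if_pos (by simp), List.flatMap_cons, List.flatMap_nil, List.append_nil,
              bScan_append_free hbuf, List.nil_append]
          simp [bScan, hcds]
        | cons t ts =>
          rw [List.flatMap_cons]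
          have h2 : bScan ds (buf ++ [c] ++ t) [] = (buf ++ [c]) :: bScan ds t [] := by
            rw [List.append_assoc, bScan_append_free hbuf, List.nil_append,
                show ([c] ++ t) = c :: t from rfl, bScan, if_pos hcds]
          rw [h2]
          have hrest : bScan ds t [] ++ ts.flatMap (fun t => bScan ds t []) =
              bScan (d :: ds) cs [] := by
            have h3 := ih [] (by intro a ha; simp at ha)
            rw [hsc] at h3
            simpa [List.flatMap_cons] using h3
          rw [List.cons_append, hrest]
          simp
      · rw [if_neg (by simp [hcd]), if_neg (by simp [hcd, hcds])]
        exact ih (buf ++ [c]) (by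
          intro a ha; rcases List.mem_append.1 ha with h | h
          · exact hbuf a h
          · simp at h; subst h; exact hcds)

-- ---- per-unit, step, and the main fold ----
theorem per_unit {d : Char} {ds : List Char} (hd : d ∉ ds)
    (hds : ∀ c ∈ d :: ds, PySem.Chars.isspace c = false) (u : List Char) :
    stripFilter ((aPassUnit d u).flatMap (fun t => bScan ds t [])) =
    stripFilter (bScan (d :: ds) u []) := by
  have hds' : ∀ c ∈ ds, PySem.Chars.isspace c = false := fun c hc => hds c (by simp [hc])
  rw [aPassUnit]
  by_cases hin : PySem.Chars.isIn [d] u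
  · rw [if_pos hin, splitOn_eq_parts]
    rcases attach_parts d u [] with h | ⟨w, hw, hws, hwn⟩
    · rw [show (([] : List Char)).reverse = ([] : List Char) from rfl] at h
      rw [h, bScan_compose hd u [] (by intro a ha; simp at ha)]
    · rw [show (([] : List Char)).reverse = ([] : List Char) from rfl] at hw
      rw [← bScan_compose hd u [] (by intro a ha; simp at ha), hw, List.flatMap_append,
          stripFilter_append]
      have hwfree : dsFree ds w := by
        intro a ha hm
        have h1 := hds' a hm
        have h2 := (strip_eq_nil_iff w).1 hws a ha
        rw [h2] at h1; exact absurd h1 (by simp)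
      rw [List.flatMap_cons, List.flatMap_nil, List.append_nil, bScan_free hwfree,
          List.nil_append, if_pos hwn, stripFilter_single, if_neg (by simp [hws])]
      simp
  · rw [if_neg hin]
    have hdm : d ∉ u := by
      intro hm
      have : PySem.Chars.isIn [d] u = true := by
        rw [PySem.Chars.isIn_iff_infix]
        exact (List.singleton_infix_iff d u).mpr hm
      exact hin this
    rw [List.flatMap_cons, List.flatMap_nil, List.append_nil, bScan_not_mem hdm]

theorem step_lemma {d : Char} {ds : List Char} (hd : d ∉ ds)
    (hds : ∀ c ∈ d :: ds, PySem.Chars.isspace c = false) (units : List (List Char)) :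
    stripFilter ((aPass units d).flatMap (fun t => bScan ds t [])) =
    stripFilter (units.flatMap (fun u => bScan (d :: ds) u [])) := by
  have hds' : ∀ c ∈ ds, PySem.Chars.isspace c = false := fun c hc => hds c (by simp [hc])
  rw [aPass]
  have hdrop : ∀ X : List (List Char),
      stripFilter ((stripFilter X).flatMap (fun t => bScan ds t [])) =
      stripFilter (X.flatMap (fun t => bScan ds t [])) := by
    intro X
    induction X with
    | nil => rfl
    | cons x xs ih =>
      rw [stripFilter_cons, List.flatMap_append, stripFilter_append, ih,
          List.flatMap_cons, stripFilter_append]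
      congr 1
      by_cases hx : PySem.Chars.strip x = []
      · rw [if_neg (by simp [hx]), stripFilter_bScan_blank hds' hx]
        rfl
      · rw [if_pos (by simp [hx]), List.flatMap_cons, List.flatMap_nil, List.append_nil,
            stripFilter_bScan_strip hds']
  rw [hdrop, List.flatMap_assoc, stripFilter_flatMap, stripFilter_flatMap]
  congr 1
  funext u
  exact per_unit hd hds u

theorem fold_eq {dsl : List Char} (hnd : dsl.Nodup)
    (hds : ∀ c ∈ dsl, PySem.Chars.isspace c = false) :
    ∀ units, goodUnits units →
    dsl.foldl aPass units = stripFilter (units.flatMap (fun u => bScan dsl u [])) := by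
  induction dsl with
  | nil =>
    intro units hg
    rw [List.foldl_nil]
    conv_lhs => rw [← stripFilter_of_good hg, stripFilter_eq_flatMap]
    rw [stripFilter_flatMap]
    congr 1
    funext u
    rw [bScan_free (by intro a ha hm; simp at hm) ([] : List Char), List.nil_append]
    by_cases hu : u = []
    · subst hu; simp [stripFilter, strip_nil]
    · rw [if_pos hu]
  | cons d ds ih =>
    intro units hg
    rw [List.foldl_cons,
        ih (List.nodup_cons.1 hnd).2 (fun c hc => hds c (by simp [hc])) (aPass units d)
          (goodUnits_stripFilter _),
        step_lemma (List.nodup_cons.1 hnd).1 hds units]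

theorem delims_nonspace :
    ∀ c ∈ ('.' :: ['!', '?', '。', '！', '？', ',', '，', ';', '：', ':'] : List Char),
      PySem.Chars.isspace c = false := by
  intro c hc; fin_cases hc <;> rfl

theorem main_units_eq (t : List Char) :
    pvDelims.foldl aPass [t] = stripFilter (bScan pvDelims t []) := by
  have hp : pvDelims = '.' :: ['!', '?', '。', '！', '？', ',', '，', ';', '：', ':'] := rfl
  rw [hp, List.foldl_cons,
      fold_eq (by decide) (fun c hc => delims_nonspace c (List.mem_cons_of_mem _ hc))
        (aPass [t] '.') (goodUnits_stripFilter _),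
      step_lemma (by decide) delims_nonspace [t],
      List.flatMap_cons, List.flatMap_nil, List.append_nil]

-- ---- B-side helper ↔ A-side loop equalities ----
theorem bUnits_go (l : List (List Char)) :
    ∀ init, l.foldl (fun acc t =>
      if PySem.Chars.strip t ≠ [] then acc ++ [PySem.Chars.strip t] else acc) init
    = init ++ stripFilter l := by
  induction l with
  | nil => intro init; simp [stripFilter]
  | cons t rest ih =>
    intro init
    rw [List.foldl_cons, stripFilter_cons]
    by_cases h : PySem.Chars.strip t ≠ []
    · rw [if_pos h, ih, if_pos h, List.append_assoc]
    · rw [if_neg h, ih, if_neg h, List.nil_append]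

theorem bUnits_eq (l : List (List Char)) : bUnits l = stripFilter l := by
  rw [bUnits, bUnits_go, List.nil_append]

theorem bKeep_go (l : List (List Char)) :
    ∀ init, l.foldl (fun acc u =>
      if PySem.Chars.strip u ≠ [] then acc ++ [u] else acc) init
    = init ++ l.filter (fun u => PySem.Chars.strip u ≠ []) := by
  induction l with
  | nil => intro init; simp
  | cons u rest ih =>
    intro init
    rw [List.foldl_cons, List.filter_cons]
    by_cases h : PySem.Chars.strip u ≠ []
    · rw [if_pos h, ih, if_pos (by simpa using h), List.append_assoc, List.singleton_append]
    · rw [if_neg h, ih, if_neg (by simpa using h)]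

theorem bKeep_eq (l : List (List Char)) :
    bKeep l = l.filter (fun u => PySem.Chars.strip u ≠ []) := by
  rw [bKeep, bKeep_go, List.nil_append]

theorem alcFindSplit_eq_find? (u : List Char) (is : List Int) :
    alcFindSplit u is = is.find? (fun i => decide (0 < i ∧ i < PySem.List.len u ∧
      (PySem.List.pyGetD u i ' ') ∈ ([' ', '，', ',', '、'] : List Char))) := by
  induction is with
  | nil => rfl
  | cons i rest ih =>
    rw [alcFindSplit, List.find?]
    split_ifs with h
    · rw [decide_eq_true h]
    · rw [decide_eq_false h, ih]

theorem len_append (a b : List Char) :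
    PySem.List.len (a ++ b) = PySem.List.len a + PySem.List.len b := by
  simp [PySem.List.len]

-- A's per-unit long-split branch equals bSplitLong
theorem splitStep_eq (M : Int) (u : List Char) :
    (if M * 3 < PySem.List.len u then
        let mid := PySem.Int.floordiv (PySem.List.len u) 2
        match alcFindSplit u (PySem.List.pyRange (mid - 5) (mid + 5) 1) with
        | some i => [PySem.Chars.strip (PySem.Chars.slice u none (some (i + 1))),
                     PySem.Chars.strip (PySem.Chars.slice u (some (i + 1)) none)]
        | none   => [PySem.Chars.strip (PySem.Chars.slice u none (some mid)),
                     PySem.Chars.strip (PySem.Chars.slice u (some mid) none)]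
      else [u]) = bSplitLong u M := by
  rw [bSplitLong]
  by_cases h : PySem.List.len u ≤ M * 3
  · rw [if_pos h, if_neg (by omega)]
  · rw [if_neg h, if_pos (by omega)]
    simp only []
    rw [alcFindSplit_eq_find?]
    cases hf : (PySem.List.pyRange (PySem.Int.floordiv (PySem.List.len u) 2 - 5)
        (PySem.Int.floordiv (PySem.List.len u) 2 + 5) 1).find?
        (fun i => decide (0 < i ∧ i < PySem.List.len u ∧
          (PySem.List.pyGetD u i ' ') ∈ ([' ', '，', ',', '、'] : List Char))) with
    | none =>
      simp only [Option.getD]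
      rw [show PySem.Int.floordiv (PySem.List.len u) 2 - 1 + 1 =
          PySem.Int.floordiv (PySem.List.len u) 2 from by ring]
    | some i => simp only [Option.getD]

-- A's split foldl equals B's flatMap over bSplitLong
theorem foldl_split_eq (M : Int) (units : List (List Char)) (init : List (List Char)) :
    units.foldl (fun acc unit =>
      if M * 3 < PySem.List.len unit then
        let mid := PySem.Int.floordiv (PySem.List.len unit) 2
        match alcFindSplit unit (PySem.List.pyRange (mid - 5) (mid + 5) 1) with
        | some i => acc ++ [PySem.Chars.strip (PySem.Chars.slice unit none (some (i + 1))),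
                            PySem.Chars.strip (PySem.Chars.slice unit (some (i + 1)) none)]
        | none   => acc ++ [PySem.Chars.strip (PySem.Chars.slice unit none (some mid)),
                            PySem.Chars.strip (PySem.Chars.slice unit (some mid) none)]
      else acc ++ [unit]) init
    = init ++ units.flatMap (fun u => bSplitLong u M) := by
  induction units generalizing init with
  | nil => simp
  | cons u rest ih =>
    rw [List.foldl_cons, List.flatMap_cons]
    have hstep : ∀ acc : List (List Char),
        (if M * 3 < PySem.List.len u then
          let mid := PySem.Int.floordiv (PySem.List.len u) 2
          match alcFindSplit u (PySem.List.pyRange (mid - 5) (mid + 5) 1) with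
          | some i => acc ++ [PySem.Chars.strip (PySem.Chars.slice u none (some (i + 1))),
                              PySem.Chars.strip (PySem.Chars.slice u (some (i + 1)) none)]
          | none   => acc ++ [PySem.Chars.strip (PySem.Chars.slice u none (some mid)),
                              PySem.Chars.strip (PySem.Chars.slice u (some mid) none)]
        else acc ++ [u]) = acc ++ bSplitLong u M := by
      intro acc
      rw [← splitStep_eq M u]
      split_ifs with h
      · cases hh : alcFindSplit u (PySem.List.pyRange (PySem.Int.floordiv (PySem.List.len u) 2 - 5)
            (PySem.Int.floordiv (PySem.List.len u) 2 + 5) 1) <;> simp only [hh]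
      · rfl
    rw [hstep, ih, List.append_assoc]

-- A's merge foldl equals B's recursive merge (proof-side names for A's loop body and epilogue)
def mStep (m : Int) (p : List (List Char) × List Char) (unit : List Char) :
    List (List Char) × List Char :=
  if PySem.List.len (p.2 ++ unit) < m * 2 then (p.1, p.2 ++ unit)
  else ((if p.2 ≠ [] then p.1 ++ [PySem.Chars.strip p.2] else p.1), unit)

def mFin (p : List (List Char) × List Char) : List (List Char) :=
  if p.2 ≠ [] then p.1 ++ [PySem.Chars.strip p.2] else p.1

theorem mStep_eq_bMergeStep (m : Int) : mStep m = bMergeStep m := by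
  funext p u
  rw [mStep, bMergeStep, len_append]

-- A's apply_length_constraints equals B's constrain
theorem alc_eq_bConstrain (units : List (List Char)) (m M : Int) :
    applyLengthConstraints units m M false = bConstrain units m M := by
  rw [applyLengthConstraints, bConstrain]
  by_cases h : m ≤ 1 ∧ 50 ≤ M
  · rw [if_pos h, if_pos h]
  · rw [if_neg h, if_neg h]
    simp only []
    rw [foldl_split_eq, List.nil_append, ← bKeep_eq]
    by_cases hm : 1 < m
    · rw [if_pos hm, if_pos hm]
      show bKeep (mFin (List.foldl (mStep m) ([], [])
          (units.flatMap (fun u => bSplitLong u M)))) =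
        bKeep (bMerge m (units.flatMap (fun u => bSplitLong u M)))
      rw [mStep_eq_bMergeStep]
      rfl
    · rw [if_neg hm, if_neg hm]

-- ===== VERDICT (by name: the statement is the Claim_ definition above) =====
theorem basic_text_split_spec : Claim_equal_basic_text_split := by
  intro text min_tokens max_tokens _
  show basic_text_split text min_tokens max_tokens = _
  show (applyLengthConstraints (pvDelims.foldl aPass [text.toList]) min_tokens max_tokens false).map
        String.ofList =
      (bConstrain (bUnits (bScan pvDelims text.toList [])) min_tokens max_tokens).map String.ofList
  rw [main_units_eq, bUnits_eq, alc_eq_bConstrain]
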